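-- pv_equiv track=rewrite | github.com/Intellirim/inalign | backend/app/detectors/mcp/tool_analyzer.py | _sequence_matches
-- ===== SOURCE A (Python) =====
-- def _sequence_matches(
--
--     tool_sequence: list[str],
--     start_patterns: list[str],
--     end_patterns: list[str],
-- ) -> bool:
--     """Check if a tool sequence matches start→end pattern."""
--     found_start_idx = -1
--
--     for i, tool in enumerate(tool_sequence):
--         if any(p in tool for p in start_patterns):
--             found_start_idx = i
--         elif found_start_idx >= 0 and any(p in tool for p in end_patterns):
--             return True
--
--     return False
-- ===== SOURCE B (Python) =====
-- def _sequence_matches(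
--     tool_sequence: list[str],
--     start_patterns: list[str],
--     end_patterns: list[str],
-- ) -> bool:
--     """Check if a tool sequence matches start->end pattern."""
--     s = next(
--         (i for i, t in enumerate(tool_sequence)
--          if any(p in t for p in start_patterns)),
--         None,
--     )
--     if s is None:
--         return False
--     return any(
--         any(p in t for p in end_patterns)
--         and not any(p in t for p in start_patterns)
--         for t in tool_sequence[s + 1:]
--     )
-- ===== Notes on version B (the rewrite author's own statement) =====
-- stated objective: alternative
-- what changed: Replaced the single-pass state-machine carrying a found_start_idx flag with a find-first-start-index step followed by an any() scan of the suffix after it (excluding tools that themselves match a start pattern, mirroring the elif priority).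
import Mathlib
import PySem

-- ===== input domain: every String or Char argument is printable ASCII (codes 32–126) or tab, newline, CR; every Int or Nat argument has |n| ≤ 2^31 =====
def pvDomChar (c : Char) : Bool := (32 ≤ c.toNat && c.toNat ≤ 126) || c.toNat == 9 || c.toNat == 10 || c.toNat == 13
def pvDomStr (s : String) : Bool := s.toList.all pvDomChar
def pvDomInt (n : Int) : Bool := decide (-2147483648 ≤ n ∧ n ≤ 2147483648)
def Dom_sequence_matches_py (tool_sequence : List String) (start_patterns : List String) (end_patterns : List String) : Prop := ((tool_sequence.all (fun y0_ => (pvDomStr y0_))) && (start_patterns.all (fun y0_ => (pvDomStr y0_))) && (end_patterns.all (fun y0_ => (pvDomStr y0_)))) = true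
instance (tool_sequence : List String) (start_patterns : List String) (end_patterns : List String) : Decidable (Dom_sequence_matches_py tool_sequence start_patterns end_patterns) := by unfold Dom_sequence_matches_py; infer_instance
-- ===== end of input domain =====

-- ===== PORT A =====
-- B differs from A by decomposition only (find first start index, then scan the suffix); same cost.
def pvAnyIn (patterns : List String) (tool : String) : Bool :=
  patterns.any (fun p => PySem.Str.isIn p tool)

-- the for-loop of A, carrying the enumerate counter i and found_start_idx
def pvLoopA (start_patterns end_patterns : List String) :
    List String → Int → Int → Bool
  | [], _, _ => false
  | tool :: rest, i, foundStartIdx =>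
    if pvAnyIn start_patterns tool then
      pvLoopA start_patterns end_patterns rest (i + 1) i
    else if foundStartIdx ≥ 0 && pvAnyIn end_patterns tool then
      true
    else
      pvLoopA start_patterns end_patterns rest (i + 1) foundStartIdx

def sequence_matches_py (tool_sequence : List String) (start_patterns : List String) (end_patterns : List String) : Bool :=
  pvLoopA start_patterns end_patterns tool_sequence 0 (-1)

-- ===== PORT B =====
def sequence_matches_py_alt (tool_sequence : List String) (start_patterns : List String) (end_patterns : List String) : Bool :=
  match tool_sequence.findIdx? (fun t => pvAnyIn start_patterns t) with
  | none => false
  | some s =>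
    (tool_sequence.drop (s + 1)).any
      (fun t => pvAnyIn end_patterns t && !pvAnyIn start_patterns t)

-- ===== PRECONDITION & SPEC =====
def Spec_sequence_matches_py (tool_sequence : List String) (start_patterns : List String) (end_patterns : List String) (out : Bool) : Prop := out = sequence_matches_py_alt tool_sequence start_patterns end_patterns
instance (tool_sequence : List String) (start_patterns : List String) (end_patterns : List String) (out : Bool) : Decidable (Spec_sequence_matches_py tool_sequence start_patterns end_patterns out) := by unfold Spec_sequence_matches_py; infer_instance

-- ===== CLAIM (what is proved, stated in full; the proofs are below) =====
def Claim_equal_sequence_matches_py : Prop := ∀ (tool_sequence : List String) (start_patterns : List String) (end_patterns : List String), Dom_sequence_matches_py tool_sequence start_patterns end_patterns → Spec_sequence_matches_py tool_sequence start_patterns end_patterns (sequence_matches_py tool_sequence start_patterns end_patterns)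

-- ===== LEMMAS AND PROOFS =====

-- once a start has been seen (foundStartIdx ≥ 0), A's loop is exactly an `any` over the rest
theorem pvLoopA_found (sp ep : List String) (seq : List String) :
    ∀ (i idx : Int), 0 ≤ i → 0 ≤ idx →
    pvLoopA sp ep seq i idx =
      seq.any (fun t => pvAnyIn ep t && !pvAnyIn sp t) := by
  induction seq with
  | nil => intro i idx hi h; simp [pvLoopA]
  | cons t rest ih =>
    intro i idx hi h
    simp only [pvLoopA, List.any_cons]
    by_cases hs : pvAnyIn sp t
    · simp [hs, ih (i + 1) i (by omega) hi]
    · by_cases he : pvAnyIn ep t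
      · simp [hs, he, decide_eq_true h]
      · simp [hs, he, ih (i + 1) idx (by omega) h]

-- before any start has been seen (foundStartIdx < 0), A's loop is B's decomposition
theorem pvLoopA_notfound (sp ep : List String) (seq : List String) :
    ∀ (i idx : Int), 0 ≤ i → idx < 0 →
    pvLoopA sp ep seq i idx =
      match seq.findIdx? (fun t => pvAnyIn sp t) with
      | none => false
      | some s => (seq.drop (s + 1)).any (fun t => pvAnyIn ep t && !pvAnyIn sp t) := by
  induction seq with
  | nil => intro i idx hi h; simp [pvLoopA]
  | cons t rest ih =>
    intro i idx hi h
    by_cases hs : pvAnyIn sp t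
    · simp only [pvLoopA, hs, if_true]
      rw [pvLoopA_found sp ep rest (i + 1) i (by omega) hi]
      simp [List.findIdx?_cons, hs]
    · have hidx : (decide (idx ≥ 0) && pvAnyIn ep t) = false := by
        simp; omega
      simp only [pvLoopA, hs, if_false, Bool.false_eq_true, hidx, ge_iff_le]
      rw [ih (i + 1) idx (by omega) h]
      simp only [List.findIdx?_cons, hs]
      cases hf : rest.findIdx? (fun t => pvAnyIn sp t) with
      | none => simp
      | some s => simp [List.drop_succ_cons]

-- ===== VERDICT (by name: the statement is the Claim_ definition above) =====
theorem sequence_matches_py_spec : Claim_equal_sequence_matches_py := by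
  intro seq sp ep _
  unfold Spec_sequence_matches_py sequence_matches_py sequence_matches_py_alt
  exact pvLoopA_notfound sp ep seq 0 (-1) (by norm_num) (by norm_num)
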